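-- pv_equiv track=rewrite | github.com/SubeenPark-unofficial/DCCP | HW3/hw3_p5.py | rec_to_dia_CCW
-- ===== SOURCE A (Python) =====
-- def rec_to_dia_CCW(snail):
--
--     n = len(snail)
--     result = []
--     for i in range(n):
--         l = []
--         for j in range(i+1):
--             l.append(snail[j][j+n-1-i])
--         result.append(l)
--
--     for i in range(n-1):
--         l = []
--         for j in range(n-1-i):
--             l.append(snail[j+1+i][j])
--         result.append(l)
--
--     return result
-- ===== SOURCE B (Python) =====
-- def rec_to_dia_CCW(snail):
--     n = len(snail)
--     buckets = [[] for _ in range(2 * n - 1)]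
--     for r in range(n):
--         for c in range(n):
--             buckets[c - r + n - 1].append(snail[r][c])
--     return buckets[::-1]
-- ===== Notes on version B (the rewrite author's own statement) =====
-- stated objective: alternative
-- what changed: Replaces A's two per-diagonal gather loops with a single row-major scatter pass into 2n-1 diagonal buckets indexed by c-r, then returns the buckets reversed.
import Mathlib
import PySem

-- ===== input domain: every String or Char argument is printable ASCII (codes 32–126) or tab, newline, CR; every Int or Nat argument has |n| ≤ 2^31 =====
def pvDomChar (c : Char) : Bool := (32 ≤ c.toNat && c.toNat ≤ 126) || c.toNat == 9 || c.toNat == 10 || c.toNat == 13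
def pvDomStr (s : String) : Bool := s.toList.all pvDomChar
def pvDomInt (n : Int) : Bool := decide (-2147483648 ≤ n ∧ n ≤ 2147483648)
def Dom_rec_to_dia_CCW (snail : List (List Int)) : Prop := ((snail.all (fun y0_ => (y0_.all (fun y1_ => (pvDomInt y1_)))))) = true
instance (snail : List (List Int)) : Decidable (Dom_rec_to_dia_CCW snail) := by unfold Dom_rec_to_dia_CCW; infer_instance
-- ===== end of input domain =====

-- B replaces A's two per-diagonal gather loops by one row-major scatter pass into 2n-1
-- diagonal buckets (indexed by c-r) that are then read reversed; same O(n^2) cost.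

-- shared indexing helper: snail[r][c]; the defaults are only reachable outside Pre_ (where Python raises IndexError)
def pyAt2 (snail : List (List Int)) (r c : Int) : Int :=
  PySem.List.pyGetD (PySem.List.pyGetD snail r []) c 0

-- ===== PORT A =====
def rec_to_dia_CCW (snail : List (List Int)) : List (List Int) :=
  let n : Int := snail.length
  let result : List (List Int) :=
    (PySem.List.pyRange 0 n 1).foldl (fun result i =>
      result ++ [(PySem.List.pyRange 0 (i + 1) 1).foldl
        (fun l j => l ++ [pyAt2 snail j (j + n - 1 - i)]) []]) []
  (PySem.List.pyRange 0 (n - 1) 1).foldl (fun result i =>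
      result ++ [(PySem.List.pyRange 0 (n - 1 - i) 1).foldl
        (fun l j => l ++ [pyAt2 snail (j + 1 + i) j]) []]) result

-- ===== PORT B =====
-- buckets[k].append(v) (list mutation at index k; k is always in range in B's algorithm)
def bucketAppend (bk : List (List Int)) (k : Int) (v : Int) : List (List Int) :=
  bk.mapIdx (fun i l => if (i : Int) = k then l ++ [v] else l)

def rec_to_dia_CCW_alt (snail : List (List Int)) : List (List Int) :=
  let n : Int := snail.length
  let buckets : List (List Int) := (PySem.List.pyRange 0 (2 * n - 1) 1).map (fun _ => [])
  let buckets := (PySem.List.pyRange 0 n 1).foldl (fun bk r =>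
    (PySem.List.pyRange 0 n 1).foldl (fun bk c =>
      bucketAppend bk (c - r + n - 1) (pyAt2 snail r c)) bk) buckets
  buckets.reverse   -- buckets[::-1]

-- ===== PRECONDITION & SPEC =====
-- Pre_ excludes exactly the ragged inputs (some row shorter than len(snail)) on which the Python A raises IndexError.
def Pre_rec_to_dia_CCW (snail : List (List Int)) : Prop :=
  ∀ row ∈ snail, snail.length ≤ row.length
instance (snail : List (List Int)) : Decidable (Pre_rec_to_dia_CCW snail) := by
  unfold Pre_rec_to_dia_CCW; infer_instance
def pvWitness_rec_to_dia_CCW : List (List Int) := [[1, 2], [3, 4]]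

def Spec_rec_to_dia_CCW (snail : List (List Int)) (out : List (List Int)) : Prop := out = rec_to_dia_CCW_alt snail
instance (snail : List (List Int)) (out : List (List Int)) : Decidable (Spec_rec_to_dia_CCW snail out) := by unfold Spec_rec_to_dia_CCW; infer_instance

-- ===== CLAIM (what is proved, stated in full; the proofs are below) =====
def Claim_equal_rec_to_dia_CCW : Prop := ∀ (snail : List (List Int)), Dom_rec_to_dia_CCW snail → Pre_rec_to_dia_CCW snail → Spec_rec_to_dia_CCW snail (rec_to_dia_CCW snail)

-- ===== LEMMAS AND PROOFS =====

lemma mapIdx_id' (bk : List (List Int)) : bk.mapIdx (fun _ l => l) = bk := by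
  apply List.ext_getElem <;> simp

-- one scatter step list: folding bucketAppend over a list of columns
lemma scatter_foldl (cs : List Int) (idx : Int → Int) (v : Int → Int) (bk : List (List Int)) :
    cs.foldl (fun b c => bucketAppend b (idx c) (v c)) bk
      = bk.mapIdx (fun i l => l ++ cs.filterMap (fun c => if (i : Int) = idx c then some (v c) else none)) := by
  induction cs generalizing bk with
  | nil => simp [mapIdx_id']
  | cons c cs ih =>
      rw [List.foldl_cons, ih]
      unfold bucketAppend
      rw [List.mapIdx_mapIdx]
      apply List.ext_getElem
      · simp
      · intro p h1 h2
        simp only [List.getElem_mapIdx, List.filterMap_cons]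
        split_ifs <;> simp [List.append_assoc]

lemma scatter2 (rs : List Int) (m : Int) (idx : Int → Int → Int) (g : Int → Int → Int)
    (bk : List (List Int)) :
    rs.foldl (fun b r => (PySem.List.pyRange 0 m 1).foldl
        (fun b c => bucketAppend b (idx r c) (g r c)) b) bk
      = bk.mapIdx (fun i l => l ++ rs.flatMap (fun r =>
          (PySem.List.pyRange 0 m 1).filterMap
            (fun c => if (i : Int) = idx r c then some (g r c) else none))) := by
  induction rs generalizing bk with
  | nil => simp [mapIdx_id']
  | cons r rs ih =>
      rw [List.foldl_cons, scatter_foldl, ih, List.mapIdx_mapIdx]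
      congr 1
      funext i l
      simp [List.append_assoc]

lemma filterMap_range_single (N : Nat) (t : Int) (g : Int → Int) :
    (List.range N).filterMap (fun (k : Nat) => if t = (k : Int) then some (g (k : Int)) else none)
      = if 0 ≤ t ∧ t < (N : Int) then [g t] else [] := by
  induction N with
  | zero => simp only [List.range_zero, List.filterMap_nil]; rw [if_neg (by omega)]
  | succ N ih =>
      rw [List.range_succ, List.filterMap_append, ih, List.filterMap_cons, List.filterMap_nil]
      split_ifs with h1 h2 h3 <;> first | omega | simp_all

lemma filterMap_pyRange_single (m : Int) (t : Int) (g : Int → Int) :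
    (PySem.List.pyRange 0 m 1).filterMap (fun c => if t = c then some (g c) else none)
      = if 0 ≤ t ∧ t < m then [g t] else [] := by
  rw [PySem.List.pyRange_one, List.filterMap_map]
  have h := filterMap_range_single ((m - 0).toNat) t g
  simp only [Function.comp_def, zero_add]
  rw [h]
  by_cases hm : 0 ≤ m
  · have hc : (((m - 0).toNat : Nat) : Int) = m := by omega
    rw [hc]
  · rw [if_neg (by omega), if_neg (by omega)]

-- A's closed form
lemma portA_closed (snail : List (List Int)) :
    rec_to_dia_CCW snail
      = (PySem.List.pyRange 0 (snail.length : Int) 1).map (fun i =>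
          (PySem.List.pyRange 0 (i + 1) 1).map (fun j => pyAt2 snail j (j + (snail.length : Int) - 1 - i)))
        ++ (PySem.List.pyRange 0 ((snail.length : Int) - 1) 1).map (fun i =>
          (PySem.List.pyRange 0 ((snail.length : Int) - 1 - i) 1).map (fun j => pyAt2 snail (j + 1 + i) j)) := by
  unfold rec_to_dia_CCW
  simp only [PySem.List.foldl_append_singleton_eq_map, List.nil_append]

-- B's closed form: element i of the bucket list
lemma portB_closed (snail : List (List Int)) :
    rec_to_dia_CCW_alt snail
      = (((PySem.List.pyRange 0 (2 * (snail.length : Int) - 1) 1).map (fun _ => ([] : List Int))).mapIdx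
          (fun i l => l ++ (PySem.List.pyRange 0 (snail.length : Int) 1).flatMap (fun r =>
            (PySem.List.pyRange 0 (snail.length : Int) 1).filterMap
              (fun c => if (i : Int) = c - r + (snail.length : Int) - 1 then some (pyAt2 snail r c) else none)))).reverse := by
  simp only [rec_to_dia_CCW_alt]
  rw [scatter2]

-- the content of bucket i, as a single flatMap of singleton-or-empty lists
lemma bucket_content (snail : List (List Int)) (i : Nat) :
    (PySem.List.pyRange 0 (snail.length : Int) 1).flatMap (fun r =>
        (PySem.List.pyRange 0 (snail.length : Int) 1).filterMap
          (fun c => if (i : Int) = c - r + (snail.length : Int) - 1 then some (pyAt2 snail r c) else none))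
      = (PySem.List.pyRange 0 (snail.length : Int) 1).flatMap (fun r =>
          if 0 ≤ (i : Int) - (snail.length : Int) + 1 + r ∧ (i : Int) - (snail.length : Int) + 1 + r < (snail.length : Int)
          then [pyAt2 snail r ((i : Int) - (snail.length : Int) + 1 + r)] else []) := by
  apply List.flatMap_congr
  intro r _
  have : (fun c => if (i : Int) = c - r + (snail.length : Int) - 1 then some (pyAt2 snail r c) else none)
       = (fun c => if (i : Int) - (snail.length : Int) + 1 + r = c then some (pyAt2 snail r c) else none) := by
    funext c
    exact if_congr (by omega) rfl rfl
  rw [this, filterMap_pyRange_single]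

-- ===== VERDICT (by name: the statement is the Claim_ definition above) =====
lemma flatMap_single (l : List Int) (f : Int → Int) :
    l.flatMap (fun x => [f x]) = l.map f := by
  induction l with
  | nil => rfl
  | cons x xs ih => simp [ih]

-- ===== VERDICT (by name: the statement is the Claim_ definition above) =====
theorem rec_to_dia_CCW_spec : Claim_equal_rec_to_dia_CCW := by
  intro snail _ _
  unfold Spec_rec_to_dia_CCW
  rw [portA_closed, portB_closed]
  apply List.ext_getElem
  · simp [PySem.List.length_pyRange_one]
    omega
  · intro p h1 h2
    rw [List.getElem_append]
    simp only [List.getElem_reverse, List.getElem_mapIdx, List.getElem_map, List.nil_append]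
    rw [bucket_content]
    simp only [List.length_mapIdx, List.length_map, PySem.List.length_pyRange_one, List.length_append] at h1 h2 ⊢
    by_cases hp : p < snail.length
    · rw [dif_pos (by simpa [PySem.List.length_pyRange_one] using hp)]
      simp only [PySem.List.getElem_pyRange_one, zero_add]
      have hi : (((2 * (snail.length : Int) - 1 - 0).toNat - 1 - p : Nat) : Int)
          = 2 * (snail.length : Int) - 2 - (p : Int) := by omega
      rw [hi]
      rw [PySem.List.pyRange_one_append 0 ((p : Int) + 1) (snail.length : Int) (by omega) (by omega),
          List.flatMap_append]
      have hfst : (PySem.List.pyRange 0 ((p : Int) + 1) 1).flatMap (fun r =>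
            if 0 ≤ 2 * (snail.length : Int) - 2 - (p : Int) - (snail.length : Int) + 1 + r ∧
               2 * (snail.length : Int) - 2 - (p : Int) - (snail.length : Int) + 1 + r < (snail.length : Int)
            then [pyAt2 snail r (2 * (snail.length : Int) - 2 - (p : Int) - (snail.length : Int) + 1 + r)] else [])
          = (PySem.List.pyRange 0 ((p : Int) + 1) 1).flatMap (fun r =>
              [pyAt2 snail r (2 * (snail.length : Int) - 2 - (p : Int) - (snail.length : Int) + 1 + r)]) := by
        apply List.flatMap_congr
        intro r hr
        rw [PySem.List.mem_pyRange_one] at hr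
        rw [if_pos (by omega)]
      have hsnd : (PySem.List.pyRange ((p : Int) + 1) (snail.length : Int) 1).flatMap (fun r =>
            if 0 ≤ 2 * (snail.length : Int) - 2 - (p : Int) - (snail.length : Int) + 1 + r ∧
               2 * (snail.length : Int) - 2 - (p : Int) - (snail.length : Int) + 1 + r < (snail.length : Int)
            then [pyAt2 snail r (2 * (snail.length : Int) - 2 - (p : Int) - (snail.length : Int) + 1 + r)] else [])
          = [] := by
        rw [List.flatMap_eq_nil_iff]
        intro l hl
        rw [PySem.List.mem_pyRange_one] at hl
        rw [if_neg (by omega)]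
      rw [hfst, hsnd, flatMap_single, List.append_nil]
      apply List.map_congr_left
      intro j _
      congr 2
      ring
    · rw [dif_neg (by simpa [PySem.List.length_pyRange_one] using hp)]
      simp only [PySem.List.getElem_pyRange_one, zero_add]
      have hi : (((2 * (snail.length : Int) - 1 - 0).toNat - 1 - p : Nat) : Int)
          = 2 * (snail.length : Int) - 2 - (p : Int) := by omega
      rw [hi]
      have hq : ((p - ((snail.length : Int) - 0).toNat : Nat) : Int) = (p : Int) - (snail.length : Int) := by
        omega
      rw [hq]
      rw [PySem.List.pyRange_one_append 0 ((p : Int) - (snail.length : Int) + 1) (snail.length : Int)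
            (by omega) (by omega), List.flatMap_append]
      have hfst : (PySem.List.pyRange 0 ((p : Int) - (snail.length : Int) + 1) 1).flatMap (fun r =>
            if 0 ≤ 2 * (snail.length : Int) - 2 - (p : Int) - (snail.length : Int) + 1 + r ∧
               2 * (snail.length : Int) - 2 - (p : Int) - (snail.length : Int) + 1 + r < (snail.length : Int)
            then [pyAt2 snail r (2 * (snail.length : Int) - 2 - (p : Int) - (snail.length : Int) + 1 + r)] else [])
          = [] := by
        rw [List.flatMap_eq_nil_iff]
        intro l hl
        rw [PySem.List.mem_pyRange_one] at hl
        rw [if_neg (by omega)]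
      have hsnd : (PySem.List.pyRange ((p : Int) - (snail.length : Int) + 1) (snail.length : Int) 1).flatMap (fun r =>
            if 0 ≤ 2 * (snail.length : Int) - 2 - (p : Int) - (snail.length : Int) + 1 + r ∧
               2 * (snail.length : Int) - 2 - (p : Int) - (snail.length : Int) + 1 + r < (snail.length : Int)
            then [pyAt2 snail r (2 * (snail.length : Int) - 2 - (p : Int) - (snail.length : Int) + 1 + r)] else [])
          = (PySem.List.pyRange ((p : Int) - (snail.length : Int) + 1) (snail.length : Int) 1).flatMap (fun r =>
              [pyAt2 snail r (2 * (snail.length : Int) - 2 - (p : Int) - (snail.length : Int) + 1 + r)]) := by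
        apply List.flatMap_congr
        intro r hr
        rw [PySem.List.mem_pyRange_one] at hr
        rw [if_pos (by omega)]
      rw [hfst, hsnd, flatMap_single, List.nil_append]
      rw [PySem.List.pyRange_one, PySem.List.pyRange_one, List.map_map, List.map_map]
      have hN : (((snail.length : Int) - 1 - ((p : Int) - (snail.length : Int)) - 0).toNat : Nat)
          = ((snail.length : Int) - ((p : Int) - (snail.length : Int) + 1)).toNat := by omega
      rw [hN]
      apply List.map_congr_left
      intro k _
      simp only [Function.comp_apply]
      have e1 : (0 : Int) + (k : Int) + 1 + ((p : Int) - (snail.length : Int))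
          = ((p : Int) - (snail.length : Int) + 1) + (k : Int) := by ring
      have e2 : 2 * (snail.length : Int) - 2 - (p : Int) - (snail.length : Int) + 1 +
            (((p : Int) - (snail.length : Int) + 1) + (k : Int)) = 0 + (k : Int) := by ring
      rw [e1, ← e2]
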